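-- pv_equiv track=rewrite | github.com/evedovi/lotofacil | analises/padroes_jogadores.py | extrair_features_dezenas
-- ===== SOURCE A (Python) =====
-- def extrair_features_dezenas(dezenas):
--     dezenas = sorted(dezenas)
--     soma = sum(dezenas)
--     pares = sum(1 for d in dezenas if d % 2 == 0)
--     impares = 15 - pares
--     sequencias = sum(
--         1 for i in range(len(dezenas) - 1)
--         if dezenas[i+1] - dezenas[i] == 1
--     )
--     return {
--         "soma": soma,
--         "qtd_pares": pares,
--         "qtd_impares": impares,
--         "qtd_sequencias": sequencias,
--     }
-- ===== SOURCE B (Python) =====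
-- def extrair_features_dezenas(dezenas):
--     soma = 0
--     pares = 0
--     for d in dezenas:
--         soma += d
--         if d % 2 == 0:
--             pares += 1
--     s = set(dezenas)
--     return {
--         "soma": soma,
--         "qtd_pares": pares,
--         "qtd_impares": 15 - pares,
--         "qtd_sequencias": len(s & {d + 1 for d in s}),
--     }
-- ===== Notes on version B (the rewrite author's own statement) =====
-- stated objective: idiomatic
-- what changed: B replaces A's sort plus adjacent-index scan by a single accumulating pass for sum/parity and counts consecutive values as the size of the set intersection set(dezenas) & {d+1 for d in set(dezenas)}, with no sorting at all.
import Mathlib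
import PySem

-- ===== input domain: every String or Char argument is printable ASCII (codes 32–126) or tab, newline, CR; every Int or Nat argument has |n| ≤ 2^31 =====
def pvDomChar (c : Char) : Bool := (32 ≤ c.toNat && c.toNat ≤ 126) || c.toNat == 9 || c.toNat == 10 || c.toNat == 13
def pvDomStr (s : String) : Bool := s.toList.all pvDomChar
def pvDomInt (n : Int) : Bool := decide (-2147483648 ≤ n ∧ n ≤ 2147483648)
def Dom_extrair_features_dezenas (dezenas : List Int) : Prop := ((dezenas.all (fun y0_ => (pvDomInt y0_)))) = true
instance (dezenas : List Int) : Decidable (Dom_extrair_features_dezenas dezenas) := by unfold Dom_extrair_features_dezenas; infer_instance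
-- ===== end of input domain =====

-- B drops A's sort and adjacent-index scan: one accumulating pass for sum/parity, and the
-- consecutive count is the size of the set intersection s & {d+1 for d in s} (same return value; objective: idiomatic, not claimed faster).

-- ===== PORT A =====
def extrair_features_dezenas (dezenas : List Int) : List (String × Int) :=
  let dz := PySem.List.sorted dezenas (fun x => x) false
  let soma := dz.sum
  let pares := dz.foldl (fun acc d => if PySem.Int.mod d 2 = 0 then acc + 1 else acc) (0 : Int)
  let impares := 15 - pares
  let sequencias := (PySem.List.pyRange 0 (PySem.List.len dz - 1) 1).foldl
      (fun acc i => if PySem.List.pyGetD dz (i + 1) 0 - PySem.List.pyGetD dz i 0 = 1 then acc + 1 else acc) (0 : Int)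
  [("soma", soma), ("qtd_pares", pares), ("qtd_impares", impares), ("qtd_sequencias", sequencias)]

-- ===== PORT B =====
-- one pass accumulating (soma, pares); the set comprehension {d+1 for d in s} is consumed only
-- through membership (Set.inter), so its iteration order does not matter and the port is exact.
def extrair_features_dezenas_alt (dezenas : List Int) : List (String × Int) :=
  let sp := dezenas.foldl (fun (acc : Int × Int) d =>
      (acc.1 + d, if PySem.Int.mod d 2 = 0 then acc.2 + 1 else acc.2)) ((0 : Int), (0 : Int))
  let s : PySem.Set Int := PySem.Set.ofList dezenas
  [("soma", sp.1), ("qtd_pares", sp.2), ("qtd_impares", 15 - sp.2),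
   ("qtd_sequencias", PySem.Set.len (PySem.Set.inter s (PySem.Set.ofList (s.map (fun d => d + 1)))))]

-- ===== PRECONDITION & SPEC =====
def Spec_extrair_features_dezenas (dezenas : List Int) (out : List (String × Int)) : Prop := out = extrair_features_dezenas_alt dezenas
instance (dezenas : List Int) (out : List (String × Int)) : Decidable (Spec_extrair_features_dezenas dezenas out) := by unfold Spec_extrair_features_dezenas; infer_instance

-- ===== CLAIM (what is proved, stated in full; the proofs are below) =====
def Claim_equal_extrair_features_dezenas : Prop := ∀ (dezenas : List Int), Dom_extrair_features_dezenas dezenas → Spec_extrair_features_dezenas dezenas (extrair_features_dezenas dezenas)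

-- ===== LEMMAS AND PROOFS =====

-- B's single pass computes (initial sum + Σ, initial count + parity count).
theorem pv_fold_pair (l : List Int) (a b : Int) :
    l.foldl (fun (acc : Int × Int) d =>
        (acc.1 + d, if PySem.Int.mod d 2 = 0 then acc.2 + 1 else acc.2)) (a, b)
      = (a + l.sum, b + (l.countP (fun d => decide (PySem.Int.mod d 2 = 0)) : Int)) := by
  induction l generalizing a b with
  | nil => simp
  | cons x t ih =>
    simp only [List.foldl_cons, List.sum_cons, List.countP_cons, ih]
    by_cases h : (2 : Int) ∣ x <;> simp [h] <;>
      first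
      | (constructor <;> ring)
      | ring

-- The A-side index loop reads exactly the adjacent pairs of dz.
theorem pv_range_map_zip (L : List Int) :
    (PySem.List.pyRange 0 (PySem.List.len L - 1) 1).map
        (fun i => (PySem.List.pyGetD L i 0, PySem.List.pyGetD L (i + 1) 0))
      = L.zip L.tail := by
  apply List.ext_getElem
  · simp only [List.length_map, PySem.List.length_pyRange_one, PySem.List.len_eq,
      List.length_zip, List.length_tail]
    omega
  · intro k h1 h2
    simp only [List.getElem_map, PySem.List.getElem_pyRange_one]
    have hk : k + 1 < L.length := by
      have := h2; simp [List.length_zip] at this; omega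
    have g1 : PySem.List.pyGetD L ((0 : Int) + (k : Int)) 0 = L[k] := by
      rw [show ((0 : Int) + (k : Int)) = ((k : Int)) by ring]
      rw [PySem.List.pyGetD_natCast]
      exact List.getD_eq_getElem L 0 (by omega)
    have g2 : PySem.List.pyGetD L ((0 : Int) + (k : Int) + 1) 0 = L[k + 1] := by
      rw [show ((0 : Int) + (k : Int) + 1) = (((k + 1 : Nat) : Int)) by push_cast; ring]
      rw [PySem.List.pyGetD_natCast]
      exact List.getD_eq_getElem L 0 hk
    rw [g1, g2, List.getElem_zip, List.getElem_tail]

-- Core: on a sorted list, the number of adjacent gaps of 1 equals the number of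
-- distinct values d with d-1 also present.
theorem pv_core (L : List Int) (h : L.Pairwise (· ≤ ·)) :
    (L.zip L.tail).countP (fun p => decide (p.2 - p.1 = 1))
      = (L.toFinset.filter (fun d => d - 1 ∈ L.toFinset)).card := by
  induction L with
  | nil => simp
  | cons a M ih =>
    cases M with
    | nil =>
      have hne : ¬ (a - 1 = a) := by omega
      simp [Finset.filter_singleton, hne]
    | cons b t =>
      rw [List.pairwise_cons] at h
      obtain ⟨ha, h'⟩ := h
      have hb : ∀ x ∈ t, b ≤ x := (List.pairwise_cons.mp h').1
      have ih' := ih h'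
      have hab : a ≤ b := ha b (by simp)
      have hMF : ∀ x ∈ (b :: t).toFinset, b ≤ x := by
        intro x hx
        rw [List.mem_toFinset, List.mem_cons] at hx
        rcases hx with rfl | hx
        · exact le_refl x
        · exact hb x hx
      have hz : ((a :: b :: t).zip (a :: b :: t).tail).countP (fun p => decide (p.2 - p.1 = 1))
          = (if b - a = 1 then 1 else 0) + ((b :: t).zip (b :: t).tail).countP (fun p => decide (p.2 - p.1 = 1)) := by
        simp only [List.tail_cons, List.zip_cons_cons, List.countP_cons]
        by_cases h1 : b - a = 1 <;> simp [h1]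
        omega
      rw [hz, ih']
      by_cases hEq : a = b
      · subst hEq
        have hins : (a :: a :: t).toFinset = (a :: t).toFinset := by
          simp [List.toFinset_cons]
        rw [hins]
        simp
      · have hlt : a < b := lt_of_le_of_ne hab hEq
        have haM : a ∉ (b :: t).toFinset := fun hmem => absurd (hMF a hmem) (by omega)
        have hset : (a :: b :: t).toFinset = insert a (b :: t).toFinset := by
          simp [List.toFinset_cons]
        rw [hset]
        have hpa : ¬ (a - 1 ∈ insert a (b :: t).toFinset) := by
          intro hmem
          rcases Finset.mem_insert.mp hmem with he | hm
          · omega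
          · have := hMF _ hm; omega
        rw [Finset.filter_insert, if_neg hpa]
        by_cases h1 : b - a = 1
        · rw [if_pos h1]
          have hbM : b ∈ (b :: t).toFinset := by simp
          have hfe : (b :: t).toFinset.filter (fun d => d - 1 ∈ insert a (b :: t).toFinset)
              = insert b ((b :: t).toFinset.filter (fun d => d - 1 ∈ (b :: t).toFinset)) := by
            ext d
            simp only [Finset.mem_filter, Finset.mem_insert]
            constructor
            · rintro ⟨hd, hd1⟩
              rcases hd1 with he | hm
              · left; have := hMF d hd; omega
              · right; exact ⟨hd, hm⟩
            · rintro (rfl | ⟨hd, hm⟩)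
              · exact ⟨hbM, Or.inl (by omega)⟩
              · exact ⟨hd, Or.inr hm⟩
          rw [hfe]
          have hbnot : b ∉ (b :: t).toFinset.filter (fun d => d - 1 ∈ (b :: t).toFinset) := by
            intro hmem
            have := (Finset.mem_filter.mp hmem).2
            have := hMF _ this; omega
          rw [Finset.card_insert_of_notMem hbnot]
          omega
        · rw [if_neg h1]
          have hfe : (b :: t).toFinset.filter (fun d => d - 1 ∈ insert a (b :: t).toFinset)
              = (b :: t).toFinset.filter (fun d => d - 1 ∈ (b :: t).toFinset) := by
            apply Finset.filter_congr
            intro d hd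
            have hdb := hMF d hd
            simp only [Finset.mem_insert]
            constructor
            · rintro (he | hm)
              · omega
              · exact hm
            · exact Or.inr
          rw [hfe]
          omega

-- A count over the distinct elements equals the same Finset cardinality.
theorem pv_set_count (M : List Int) (S : List Int) (hnd : S.Nodup)
    (hm : ∀ x, x ∈ S ↔ x ∈ M) :
    S.countP (fun d => decide (d - 1 ∈ M))
      = (M.toFinset.filter (fun d => d - 1 ∈ M.toFinset)).card := by
  rw [List.countP_eq_length_filter]
  have hndf : (S.filter (fun d => decide (d - 1 ∈ M))).Nodup := hnd.filter _
  rw [← List.toFinset_card_of_nodup hndf, List.toFinset_filter]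
  congr 1
  ext d
  simp only [Finset.mem_filter, List.mem_toFinset, hm, decide_eq_true_eq]

-- A's parity-counting loop is a countP (over any permutation of the input).
theorem pv_pares (M N : List Int) (h : M.Perm N) :
    M.foldl (fun acc d => if PySem.Int.mod d 2 = 0 then acc + 1 else acc) (0 : Int)
      = (N.countP (fun d => decide (PySem.Int.mod d 2 = 0)) : Int) := by
  have e : M.foldl (fun acc d => if PySem.Int.mod d 2 = 0 then acc + 1 else acc) (0 : Int)
      = 0 + ((M.countP (fun d => decide (PySem.Int.mod d 2 = 0)) : Int)) := by
    rw [← PySem.List.foldl_count_if (fun d => decide (PySem.Int.mod d 2 = 0)) M 0]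
    simp
  rw [e, h.countP_eq]
  ring

-- the two sequence counts coincide
theorem pv_seq (dezenas : List Int) :
    (PySem.List.pyRange 0 (PySem.List.len (PySem.List.sorted dezenas (fun x => x) false) - 1) 1).foldl
        (fun acc i => if PySem.List.pyGetD (PySem.List.sorted dezenas (fun x => x) false) (i + 1) 0
            - PySem.List.pyGetD (PySem.List.sorted dezenas (fun x => x) false) i 0 = 1 then acc + 1 else acc) (0 : Int)
      = PySem.Set.len (PySem.Set.inter (PySem.Set.ofList dezenas)
          (PySem.Set.ofList ((PySem.Set.ofList dezenas).map (fun d => d + 1)))) := by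
  set dz := PySem.List.sorted dezenas (fun x => x) false with hdz
  set s := PySem.Set.ofList dezenas with hs
  have eA : (PySem.List.pyRange 0 (PySem.List.len dz - 1) 1).foldl
        (fun acc i => if PySem.List.pyGetD dz (i + 1) 0 - PySem.List.pyGetD dz i 0 = 1 then acc + 1 else acc) (0 : Int)
      = 0 + (((PySem.List.pyRange 0 (PySem.List.len dz - 1) 1).countP
          (fun i => decide (PySem.List.pyGetD dz (i + 1) 0 - PySem.List.pyGetD dz i 0 = 1)) : Int)) := by
    rw [← PySem.List.foldl_count_if (fun i => decide (PySem.List.pyGetD dz (i + 1) 0 - PySem.List.pyGetD dz i 0 = 1))]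
    simp
  -- B side: the intersection is s filtered by membership in the shifted set
  have eB : PySem.Set.len (PySem.Set.inter s (PySem.Set.ofList (s.map (fun d => d + 1))))
      = (s.countP (fun d => decide (d - 1 ∈ dz)) : Int) := by
    unfold PySem.Set.inter PySem.Set.len
    rw [← List.countP_eq_length_filter]
    congr 1
    apply List.countP_congr
    intro d _
    have h1 : PySem.Set.contains (PySem.Set.ofList (s.map (fun x => x + 1))) d = true ↔ d - 1 ∈ dz := by
      rw [PySem.Set.contains_iff, PySem.Set.mem_ofList, List.mem_map]
      constructor
      · rintro ⟨y, hy, hyd⟩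
        rw [hdz, PySem.List.mem_sorted]
        rw [hs, PySem.Set.mem_ofList] at hy
        have : y = d - 1 := by omega
        rwa [← this]
      · intro hd
        refine ⟨d - 1, ?_, by ring⟩
        rw [hs, PySem.Set.mem_ofList]
        rw [hdz, PySem.List.mem_sorted] at hd
        exact hd
    rw [Bool.eq_iff_iff, h1]
    simp
  rw [eB, eA, zero_add]
  congr 1
  have hmapped : ((PySem.List.pyRange 0 (PySem.List.len dz - 1) 1).map
        (fun i => (PySem.List.pyGetD dz i 0, PySem.List.pyGetD dz (i + 1) 0))).countP
        (fun p => decide (p.2 - p.1 = 1))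
      = (PySem.List.pyRange 0 (PySem.List.len dz - 1) 1).countP
        (fun i => decide (PySem.List.pyGetD dz (i + 1) 0 - PySem.List.pyGetD dz i 0 = 1)) :=
    List.countP_map
  rw [← hmapped, pv_range_map_zip dz]
  have hsorted : dz.Pairwise (· ≤ ·) := PySem.List.sorted_pairwise dezenas (fun x => x)
  rw [pv_core dz hsorted]
  have hmemS : ∀ x, x ∈ s ↔ x ∈ dz := by
    intro x; rw [hs, PySem.Set.mem_ofList, hdz, PySem.List.mem_sorted]
  rw [pv_set_count dz s (PySem.Set.nodup_ofList dezenas) hmemS]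

-- ===== VERDICT (by name: the statement is the Claim_ definition above) =====
theorem extrair_features_dezenas_spec : Claim_equal_extrair_features_dezenas := by
  intro dezenas _
  unfold Spec_extrair_features_dezenas extrair_features_dezenas extrair_features_dezenas_alt
  simp only
  rw [pv_fold_pair dezenas 0 0,
      (PySem.List.sorted_perm dezenas (fun x => x) false).sum_eq,
      pv_pares _ _ (PySem.List.sorted_perm dezenas (fun x => x) false),
      pv_seq dezenas]
  simp
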